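-- pv_equiv track=rewrite | github.com/yrapop01/fable | fable/tex.py | macros
-- ===== SOURCE A (Python) =====
-- def macros(s):
--     name = ''
--     for c in s:
--         if not name and c != '\\':
--             yield c
--             continue
--         if name == '\\' and (c == '\\' or c in '{}<>|'):
--             yield name + c
--             name = ''
--             continue
--         if name and c.isalpha():
--             name += c
--             continue
--         if name:
--             yield name
--             name = ''
--         if c == '\\':
--             name = c
--         else:
--             yield c
--     if name:
--         yield name
-- ===== SOURCE B (Python) =====
-- def macros(s):
--     i, n = 0, len(s)
--     while i < n:
--         c = s[i]
--         if c != '\\':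
--             yield c
--             i += 1
--         elif i + 1 < n and (s[i+1] == '\\' or s[i+1] in '{}<>|'):
--             yield s[i:i+2]
--             i += 2
--         elif i + 1 < n and s[i+1].isalpha():
--             j = i + 1
--             while j < n and s[j].isalpha():
--                 j += 1
--             yield s[i:j]
--             i = j
--         else:
--             yield '\\'
--             i += 1
-- ===== Notes on version B (the rewrite author's own statement) =====
-- stated objective: alternative
-- what changed: Replaced the accumulator state machine (a 'name' buffer threaded across iterations with four interacting branches) by a stateless lookahead scanner: at each position it decides the whole token at once (escaped special, letter run via an inner scan, lone backslash, or plain char) and jumps past it.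
import Mathlib
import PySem

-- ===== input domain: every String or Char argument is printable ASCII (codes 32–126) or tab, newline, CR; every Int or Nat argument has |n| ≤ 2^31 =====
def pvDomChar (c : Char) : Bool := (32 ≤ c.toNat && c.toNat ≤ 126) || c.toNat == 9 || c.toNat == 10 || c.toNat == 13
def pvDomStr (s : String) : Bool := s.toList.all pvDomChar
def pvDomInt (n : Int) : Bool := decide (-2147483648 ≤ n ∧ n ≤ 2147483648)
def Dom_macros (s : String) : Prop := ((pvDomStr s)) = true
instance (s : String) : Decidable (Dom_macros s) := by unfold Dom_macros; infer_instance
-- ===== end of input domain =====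

-- B replaces A's threaded 'name'-buffer state machine by a stateless lookahead scanner
-- that emits each whole token at once (alternative decomposition, same cost).

-- ===== PORT A =====
-- A's loop: iterate over the characters, threading the accumulated macro name 'name';
-- the final 'if name: yield name' is the [] case.  Strings are handled as List Char
-- ('name += c' is 'name ++ [c]'); c.isalpha() is PySem.Chars.isalpha (exact on Dom).
def macrosLoopA (name : List Char) : List Char → List String
  | [] => if name = [] then [] else [String.mk name]
  | c :: cs =>
    if name = [] ∧ c ≠ '\\' then
      String.mk [c] :: macrosLoopA name cs
    else if name = ['\\'] ∧ (c = '\\' ∨ c ∈ ['{', '}', '<', '>', '|']) then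
      String.mk (name ++ [c]) :: macrosLoopA [] cs
    else if name ≠ [] ∧ PySem.Chars.isalpha c then
      macrosLoopA (name ++ [c]) cs
    else
      let rest := if c = '\\' then macrosLoopA ['\\'] cs else String.mk [c] :: macrosLoopA [] cs
      if name ≠ [] then String.mk name :: rest else rest

def macros (s : String) : List String := macrosLoopA [] s.toList

-- ===== PORT B =====
-- B's scanner: look at the head (and one character of lookahead after '\'), emit the
-- whole token, recurse on the remainder; letter runs come from the inner while loop,
-- i.e. takeWhile/dropWhile on isalpha.
def macrosScanB : List Char → List String
  | [] => []
  | c :: cs =>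
    if c ≠ '\\' then String.mk [c] :: macrosScanB cs
    else
      match cs with
      | [] => [String.mk ['\\']]
      | d :: cs' =>
        if d = '\\' ∨ d ∈ ['{', '}', '<', '>', '|'] then
          String.mk ['\\', d] :: macrosScanB cs'
        else if PySem.Chars.isalpha d then
          String.mk ('\\' :: d :: cs'.takeWhile PySem.Chars.isalpha) ::
            macrosScanB (cs'.dropWhile PySem.Chars.isalpha)
        else
          String.mk ['\\'] :: macrosScanB (d :: cs')
  termination_by l => l.length
  decreasing_by
    · simp
    · simp
    · have := List.length_dropWhile_le (p := PySem.Chars.isalpha) (l := cs')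
      simp; omega
    · simp

def macros_alt (s : String) : List String := macrosScanB s.toList

-- ===== PRECONDITION & SPEC =====
def Spec_macros (s : String) (out : List String) : Prop := out = macros_alt s
instance (s : String) (out : List String) : Decidable (Spec_macros s out) := by unfold Spec_macros; infer_instance

-- ===== CLAIM (what is proved, stated in full; the proofs are below) =====
def Claim_equal_macros : Prop := ∀ (s : String), Dom_macros s → Spec_macros s (macros s)

-- ===== LEMMAS AND PROOFS =====

-- Unfolding equations for B's scanner, one per token kind.
theorem scanB_plain (c : Char) (cs : List Char) (hc : c ≠ '\\') :
    macrosScanB (c :: cs) = String.mk [c] :: macrosScanB cs := by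
  rw [macrosScanB.eq_def]; simp [hc]

theorem scanB_bs_nil : macrosScanB ['\\'] = [String.mk ['\\']] := by
  rw [macrosScanB.eq_def]; simp

theorem scanB_bs_special (d : Char) (cs' : List Char)
    (h : d = '\\' ∨ d ∈ ['{', '}', '<', '>', '|']) :
    macrosScanB ('\\' :: d :: cs') = String.mk ['\\', d] :: macrosScanB cs' := by
  rw [macrosScanB.eq_def]; simp at h ⊢; rcases h with h | h | h | h | h | h <;> simp [h]

theorem scanB_bs_alpha (d : Char) (cs' : List Char)
    (h : ¬(d = '\\' ∨ d ∈ ['{', '}', '<', '>', '|'])) (ha : PySem.Chars.isalpha d = true) :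
    macrosScanB ('\\' :: d :: cs') =
      String.mk ('\\' :: d :: cs'.takeWhile PySem.Chars.isalpha) ::
        macrosScanB (cs'.dropWhile PySem.Chars.isalpha) := by
  rw [macrosScanB.eq_def]; push_neg at h; simp at h; simp [h.1, h.2.1, h.2.2.1, h.2.2.2.1, h.2.2.2.2, ha]

theorem scanB_bs_other (d : Char) (cs' : List Char)
    (h : ¬(d = '\\' ∨ d ∈ ['{', '}', '<', '>', '|'])) (ha : ¬PySem.Chars.isalpha d = true) :
    macrosScanB ('\\' :: d :: cs') = String.mk ['\\'] :: macrosScanB (d :: cs') := by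
  rw [macrosScanB.eq_def]; push_neg at h; simp at h; simp [h.1, h.2.1, h.2.2.1, h.2.2.2.1, h.2.2.2.2, ha]

-- Combined invariant for the three reachable states of A's loop:
-- empty name, pending lone backslash, backslash plus a nonempty letter run.
theorem macrosLoopA_states (cs : List Char) :
    (macrosLoopA [] cs = macrosScanB cs) ∧
    (macrosLoopA ['\\'] cs = macrosScanB ('\\' :: cs)) ∧
    (∀ L : List Char, L ≠ [] → (∀ c ∈ L, PySem.Chars.isalpha c) →
      macrosLoopA ('\\' :: L) cs =
        String.mk ('\\' :: (L ++ cs.takeWhile PySem.Chars.isalpha)) ::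
          macrosScanB (cs.dropWhile PySem.Chars.isalpha)) := by
  induction cs with
  | nil =>
    refine ⟨by simp [macrosLoopA, macrosScanB], by simp [macrosLoopA, scanB_bs_nil], fun L hL _ => ?_⟩
    simp [macrosLoopA, macrosScanB]
  | cons c cs ih =>
    obtain ⟨ih1, ih2, ih3⟩ := ih
    refine ⟨?_, ?_, ?_⟩
    · by_cases hc : c = '\\'
      · subst hc; simp [macrosLoopA, ih2]
      · simp [macrosLoopA, hc, ih1, scanB_plain c cs hc]
    · by_cases hspec : c = '\\' ∨ c ∈ ['{', '}', '<', '>', '|']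
      · rw [scanB_bs_special c cs hspec]
        simp only [macrosLoopA]
        rcases hspec with h | h
        · subst h; simp [ih1]
        · fin_cases h <;> simp [ih1]
      · by_cases ha : PySem.Chars.isalpha c
        · have h3 := ih3 [c] (by simp) (by simpa using ha)
          have hb := scanB_bs_alpha c cs hspec ha
          push_neg at hspec
          simp only [macrosLoopA]
          simp [hspec.1, hspec.2, ha, h3, hb]
        · have hb := scanB_bs_other c cs hspec ha
          push_neg at hspec
          simp only [macrosLoopA]
          simp [hspec.1, hspec.2, ha, ih1, hb, scanB_plain c cs hspec.1]
    · intro L hL hLa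
      have hname : ('\\' :: L : List Char) ≠ ['\\'] := by
        intro h; apply hL; simpa using congrArg List.tail h
      by_cases ha : PySem.Chars.isalpha c
      · have h3 := ih3 (L ++ [c]) (by simp)
          (by intro x hx; rcases List.mem_append.1 hx with h | h
              · exact hLa x h
              · simp at h; subst h; exact ha)
        simp only [macrosLoopA]
        rw [if_neg (by simp), if_neg (by simp [hname]), if_pos ⟨by simp, ha⟩]
        simpa [List.takeWhile_cons, ha, List.dropWhile_cons] using h3
      · -- c ends the letter run: A yields the name, then handles c from the empty state
        simp only [macrosLoopA]
        rw [if_neg (by simp), if_neg (by simp [hname]), if_neg (by simp [ha])]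
        by_cases hc : c = '\\'
        · subst hc
          simp [ha, ih2]
        · simp [hc, ha, ih1, scanB_plain c cs hc]

-- ===== VERDICT (by name: the statement is the Claim_ definition above) =====
theorem macros_spec : Claim_equal_macros := by
  intro s _
  unfold Spec_macros macros macros_alt
  exact (macrosLoopA_states s.toList).1
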